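-- pv_equiv track=rewrite | github.com/ElleryAree/adventofcode | advent21/03_battery_report.py | count_ones_and_zeroes
-- ===== SOURCE A (Python) =====
-- def count_ones_and_zeroes(readings, pos):
--     ones = 0
--     zeroes = 0
--
--     for reading in readings:
--         if reading[pos] == '1':
--             ones += 1
--         else:
--             zeroes += 1
--
--     return ones, zeroes
-- ===== SOURCE B (Python) =====
-- def count_ones_and_zeroes(readings, pos):
--     # divide and conquer: split the list in halves, count each half recursively, add
--     if not readings:
--         return 0, 0
--     if len(readings) == 1:
--         return (1, 0) if readings[0][pos] == '1' else (0, 1)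
--     mid = len(readings) // 2
--     o1, z1 = count_ones_and_zeroes(readings[:mid], pos)
--     o2, z2 = count_ones_and_zeroes(readings[mid:], pos)
--     return o1 + o2, z1 + z2
-- ===== Notes on version B (the rewrite author's own statement) =====
-- stated objective: alternative
-- what changed: B replaces A's single linear pass with two threaded counters by a divide-and-conquer recursion: it splits the list at the midpoint, counts each half recursively, and adds the two (ones, zeroes) pairs.
import Mathlib
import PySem

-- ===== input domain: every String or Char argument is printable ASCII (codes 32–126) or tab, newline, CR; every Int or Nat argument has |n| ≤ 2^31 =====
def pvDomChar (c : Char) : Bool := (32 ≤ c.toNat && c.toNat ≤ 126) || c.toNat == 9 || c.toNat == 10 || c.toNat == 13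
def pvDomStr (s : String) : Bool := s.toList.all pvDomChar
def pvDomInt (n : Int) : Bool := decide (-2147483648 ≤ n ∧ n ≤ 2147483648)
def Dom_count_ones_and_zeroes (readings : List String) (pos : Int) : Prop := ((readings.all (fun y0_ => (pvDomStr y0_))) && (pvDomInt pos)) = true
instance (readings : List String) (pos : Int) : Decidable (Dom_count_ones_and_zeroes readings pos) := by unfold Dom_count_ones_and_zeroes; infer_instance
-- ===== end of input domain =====

-- B replaces A's single pass with two threaded counters by a divide-and-conquer recursion
-- (split at the midpoint, count each half, add the pairs); objective: alternative.

-- ===== PORT A =====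
-- one loop threading the pair (ones, zeroes); the else branch counts every non-'1' character
def count_ones_and_zeroes (readings : List String) (pos : Int) : Int × Int :=
  readings.foldl
    (fun (acc : Int × Int) reading =>
      if PySem.Str.pyGet? reading pos = some '1' then (acc.1 + 1, acc.2)
      else (acc.1, acc.2 + 1))
    (0, 0)

-- ===== PORT B =====
-- divide and conquer from Source B; readings[:mid] / readings[mid:] with 0 ≤ mid ≤ len are exactly
-- List.take mid / List.drop mid; len(readings) // 2 on a Nat is Nat division (Python floordiv agrees on nonnegatives)
def count_ones_and_zeroes_alt (readings : List String) (pos : Int) : Int × Int :=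
  if readings = [] then (0, 0)
  else if readings.length = 1 then
    if PySem.Str.pyGet? readings.headI pos = some '1' then (1, 0) else (0, 1)
  else
    -- mid = len(readings) // 2, inlined
    let p1 := count_ones_and_zeroes_alt (readings.take (readings.length / 2)) pos
    let p2 := count_ones_and_zeroes_alt (readings.drop (readings.length / 2)) pos
    (p1.1 + p2.1, p1.2 + p2.2)
termination_by readings.length
decreasing_by
  all_goals
    have hpos : 0 < readings.length := List.length_pos_of_ne_nil (by assumption)
    simp only [List.length_take, List.length_drop]
    omega

-- ===== PRECONDITION & SPEC =====
-- Pre_ excludes exactly the inputs on which Python A raises IndexError: some reading has pos out of range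
def Pre_count_ones_and_zeroes (readings : List String) (pos : Int) : Prop :=
  ∀ r ∈ readings, PySem.Raise.InRange r.length pos
instance (readings : List String) (pos : Int) : Decidable (Pre_count_ones_and_zeroes readings pos) := by unfold Pre_count_ones_and_zeroes; infer_instance
def pvWitness_count_ones_and_zeroes : List String × Int := (["101", "011", "0x1"], 1)

def Spec_count_ones_and_zeroes (readings : List String) (pos : Int) (out : Int × Int) : Prop := out = count_ones_and_zeroes_alt readings pos
instance (readings : List String) (pos : Int) (out : Int × Int) : Decidable (Spec_count_ones_and_zeroes readings pos out) := by unfold Spec_count_ones_and_zeroes; infer_instance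

-- ===== CLAIM (what is proved, stated in full; the proofs are below) =====
def Claim_equal_count_ones_and_zeroes : Prop := ∀ (readings : List String) (pos : Int), Dom_count_ones_and_zeroes readings pos → Pre_count_ones_and_zeroes readings pos → Spec_count_ones_and_zeroes readings pos (count_ones_and_zeroes readings pos)

-- ===== LEMMAS AND PROOFS =====
-- closed form of A's foldl
theorem count_foldl (pos : Int) (readings : List String) (a b : Int) :
    readings.foldl
      (fun (acc : Int × Int) reading =>
        if PySem.Str.pyGet? reading pos = some '1' then (acc.1 + 1, acc.2)
        else (acc.1, acc.2 + 1))
      (a, b)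
    = (a + (readings.countP (fun reading => PySem.Str.pyGet? reading pos == some '1') : Int),
       b + (readings.length : Int)
         - (readings.countP (fun reading => PySem.Str.pyGet? reading pos == some '1') : Int)) := by
  induction readings generalizing a b with
  | nil => simp
  | cons r rs ih =>
    simp only [List.foldl_cons, List.countP_cons, List.length_cons, beq_iff_eq]
    split_ifs with h <;> rw [ih] <;> refine Prod.ext ?_ ?_ <;> push_cast <;> ring

-- closed form of B's divide and conquer, by strong induction on the length
theorem alt_closed (pos : Int) (readings : List String) :
    count_ones_and_zeroes_alt readings pos
    = ((readings.countP (fun reading => PySem.Str.pyGet? reading pos == some '1') : Int),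
       (readings.length : Int)
         - (readings.countP (fun reading => PySem.Str.pyGet? reading pos == some '1') : Int)) := by
  induction hn : readings.length using Nat.strong_induction_on generalizing readings with
  | _ n ih =>
    subst hn
    rw [count_ones_and_zeroes_alt]
    split_ifs with h0 h1 hget
    · subst h0; simp
    · cases readings with
      | nil => simp_all
      | cons r rs =>
        simp only [List.length_cons, Nat.add_eq_right] at h1
        have : rs = [] := List.length_eq_zero_iff.mp h1
        subst this
        simp only [List.headI, PySem.Str.pyGet?, PySem.Chars.pyGet?] at hget
        simp [hget]
    · cases readings with
      | nil => simp_all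
      | cons r rs =>
        simp only [List.length_cons, Nat.add_eq_right] at h1
        have : rs = [] := List.length_eq_zero_iff.mp h1
        subst this
        simp only [List.headI, PySem.Str.pyGet?, PySem.Chars.pyGet?] at hget
        simp [hget]
    · have h2 : 2 ≤ readings.length := by
        cases readings with
        | nil => simp_all
        | cons r rs =>
          cases rs with
          | nil => simp_all
          | cons r2 rs2 => simp only [List.length_cons]; omega
      have e1 := ih ((readings.take (readings.length / 2)).length)
        (by simp only [List.length_take]; omega) (readings.take (readings.length / 2)) rfl
      have e2 := ih ((readings.drop (readings.length / 2)).length)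
        (by simp only [List.length_drop]; omega) (readings.drop (readings.length / 2)) rfl
      simp only [e1, e2]
      have hcount : readings.countP (fun reading => PySem.Str.pyGet? reading pos == some '1')
          = (readings.take (readings.length / 2)).countP (fun reading => PySem.Str.pyGet? reading pos == some '1')
            + (readings.drop (readings.length / 2)).countP (fun reading => PySem.Str.pyGet? reading pos == some '1') := by
        conv_lhs => rw [← List.take_append_drop (readings.length / 2) readings]
        rw [List.countP_append]
      refine Prod.ext ?_ ?_ <;>
        simp only [hcount, List.length_take, List.length_drop] <;> push_cast <;>
        (try ring_nf) <;> omega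

-- ===== VERDICT (by name: the statement is the Claim_ definition above) =====
theorem count_ones_and_zeroes_spec : Claim_equal_count_ones_and_zeroes := by
  intro readings pos _ _
  unfold Spec_count_ones_and_zeroes count_ones_and_zeroes
  rw [count_foldl, alt_closed]
  simp
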